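-- pv_equiv track=rewrite | github.com/A13k5-5/COMP0005-Algorithms | self-practice/Sorting/Triplicates.py | triplicates2
-- ===== SOURCE A (Python) =====
-- def triplicates2(a, b, c):
--     freq = {}
--     for w in a + b + c:
--         if w not in freq.keys():
--             freq[w] = 1
--         else:
--             freq[w] += 1
--     for key in freq.keys():
--         if freq[key] == 3:
--             return key
--     return None
-- ===== SOURCE B (Python) =====
-- def triplicates2(a, b, c):
--     seq = a + b + c
--     while seq:
--         w = seq[0]
--         rest = [x for x in seq[1:] if x != w]
--         if len(seq) - len(rest) == 3:
--             return w
--         seq = rest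
--     return None
-- ===== Notes on version B (the rewrite author's own statement) =====
-- stated objective: alternative
-- what changed: Replaces the dict frequency index with a shrinking scan: repeatedly take the head of the remaining list, strip every copy of it, derive its total count from the length difference, and continue on the stripped list, so each distinct value is examined exactly once and no counter structure exists.
import Mathlib
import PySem

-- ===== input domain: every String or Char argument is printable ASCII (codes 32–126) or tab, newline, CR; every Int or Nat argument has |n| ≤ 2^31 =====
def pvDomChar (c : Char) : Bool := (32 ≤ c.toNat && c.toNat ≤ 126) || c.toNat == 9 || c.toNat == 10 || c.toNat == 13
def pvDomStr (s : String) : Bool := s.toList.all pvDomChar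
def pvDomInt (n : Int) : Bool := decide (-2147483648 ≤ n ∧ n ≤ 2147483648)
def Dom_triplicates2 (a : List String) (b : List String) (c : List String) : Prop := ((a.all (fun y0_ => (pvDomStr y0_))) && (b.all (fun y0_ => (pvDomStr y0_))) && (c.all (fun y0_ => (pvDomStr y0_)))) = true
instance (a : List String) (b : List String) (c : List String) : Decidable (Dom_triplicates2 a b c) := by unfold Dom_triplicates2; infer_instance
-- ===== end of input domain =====

-- B replaces the dict frequency index with a shrinking while-loop (strip all copies of the head,
-- count via the length difference, continue on the stripped list); alternative decomposition, same value.

-- ===== PORT A =====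
def triplicates2 (a : List String) (b : List String) (c : List String) : Option String :=
  -- freq = {}; for w in a + b + c: if w not in freq.keys(): freq[w] = 1 else: freq[w] += 1
  let freq : PySem.Dict String Int :=
    (a ++ b ++ c).foldl
      (fun d w => if !(d.contains w) then d.insert w 1 else d.insert w (d.getD w 0 + 1))
      PySem.Dict.empty
  -- for key in freq.keys(): if freq[key] == 3: return key;  return None
  freq.keys.find? (fun k => freq.getD k 0 == 3)

-- ===== PORT B =====
-- while seq: w = seq[0]; rest = [x for x in seq[1:] if x != w];
--            if len(seq) - len(rest) == 3: return w; seq = rest;  return None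
-- (the while loop with shrinking seq becomes the structural recursion below)
def triplicates2Go : List String → Option String
  | [] => none
  | w :: t =>
    let rest := t.filter (fun x => x != w)
    if (w :: t).length - rest.length == 3 then some w else triplicates2Go rest
termination_by seq => seq.length
decreasing_by
  simp only [List.length_unattach, List.length_cons]
  exact Nat.lt_succ_of_le (le_trans (List.length_filter_le _ _) (by simp))

def triplicates2_alt (a : List String) (b : List String) (c : List String) : Option String :=
  triplicates2Go (a ++ b ++ c)

-- ===== PRECONDITION & SPEC =====
def Spec_triplicates2 (a : List String) (b : List String) (c : List String) (out : Option String) : Prop := out = triplicates2_alt a b c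
instance (a : List String) (b : List String) (c : List String) (out : Option String) : Decidable (Spec_triplicates2 a b c out) := by unfold Spec_triplicates2; infer_instance

-- ===== CLAIM (what is proved, stated in full; the proofs are below) =====
def Claim_equal_triplicates2 : Prop := ∀ (a : List String) (b : List String) (c : List String), Dom_triplicates2 a b c → Spec_triplicates2 a b c (triplicates2 a b c)

-- ===== LEMMAS AND PROOFS =====

-- A's branchy update equals the unconditional counter update, pointwise.
theorem upd_eq (d : PySem.Dict String Int) (w : String) :
    (if !(d.contains w) then d.insert w 1 else d.insert w (d.getD w 0 + 1))
      = d.insert w (d.getD w 0 + 1) := by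
  by_cases h : d.contains w = true
  · simp [h]
  · have h' : d.contains w = false := by simpa using h
    simp [h', PySem.Dict.getD_of_not_contains d 0 h']

-- removing all copies of an element that fails p does not change the first match
theorem find?_discard {α : Type} [BEq α] [LawfulBEq α] (p : α → Bool) (x : α)
    (hx : p x = false) : ∀ (s : List α), (PySem.Set.discard s x).find? p = s.find? p := by
  intro s
  induction s with
  | nil => simp [PySem.Set.discard]
  | cons y t ih =>
    by_cases hyx : y = x
    · subst hyx
      simp [PySem.Set.discard, List.find?, hx] at *
      simpa [PySem.Set.discard] using ih
    · by_cases hp : p y = true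
      · simp [PySem.Set.discard, hyx, List.find?, hp]
      · have hp' : p y = false := by simpa using hp
        simp [PySem.Set.discard, hyx, List.find?, hp'] at *
        simpa [PySem.Set.discard] using ih

-- finding the first match over the deduplicated list equals finding it over the list
theorem find?_ofList {α : Type} [BEq α] [LawfulBEq α] (p : α → Bool) :
    ∀ (xs : List α), (PySem.Set.ofList xs).find? p = xs.find? p := by
  intro xs
  induction xs with
  | nil => rfl
  | cons x t ih =>
    rw [PySem.Set.ofList_cons]
    by_cases hp : p x = true
    · simp [List.find?, hp]
    · have hp' : p x = false := by simpa using hp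
      simp [List.find?, hp']
      rw [find?_discard p x hp', ih]

-- casting a Nat count to Int does not change the '== 3' test
theorem cast_beq3 (n : Nat) : (((n : Int)) == 3) = (n == 3) := by
  by_cases h : n = 3
  · subst h; rfl
  · have h1 : (n == 3) = false := by simp [h]
    have h2 : (((n : Int)) == 3) = false := by simp; omega
    rw [h1, h2]

-- the length difference B computes is the head's total count
theorem len_sub_filter (w : String) (t : List String) :
    (w :: t).length - (t.filter (fun x => x != w)).length = (w :: t).count w := by
  have h : t.length = t.countP (fun x => x == w) + t.countP (fun x => x != w) := by
    simpa [Bool.not_eq_true'] using (List.length_eq_countP_add_countP (p := fun x => x == w) (l := t))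
  have hf : (t.filter (fun x => x != w)).length = t.countP (fun x => x != w) := by
    simp [List.countP_eq_length_filter]
  have hc : (w :: t).count w = t.countP (fun x => x == w) + 1 := by
    rw [List.count_cons_self, List.count_eq_countP]
  simp only [List.length_cons, hf, hc]
  omega

-- the first match of p is unchanged when every copy of a p-failing element is filtered out
theorem find?_filter_ne (p : String → Bool) (w : String) (hw : p w = false) :
    ∀ (t : List String), t.find? p = (t.filter (fun x => x != w)).find? p := by
  intro t
  induction t with
  | nil => rfl
  | cons y s ih =>
    by_cases hyw : y = w
    · subst hyw; simp [List.find?, hw, ih]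
    · by_cases hp : p y = true
      · simp [List.find?, hp, hyw]
      · have hp' : p y = false := by simpa using hp
        simp [List.find?, hp', hyw, ih]

-- find? respects pointwise-on-members equality of predicates
theorem find?_congr_mem {α : Type} (p q : α → Bool) :
    ∀ (l : List α), (∀ x ∈ l, p x = q x) → l.find? p = l.find? q := by
  intro l
  induction l with
  | nil => intro _; rfl
  | cons y s ih =>
    intro h
    have hy := h y (by simp)
    by_cases hp : p y = true
    · simp [List.find?, hp, hy ▸ hp]
    · have hp' : p y = false := by simpa using hp
      have hq' : q y = false := hy ▸ hp'
      simp [List.find?, hp', hq']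
      exact ih (fun x hx => h x (by simp [hx]))

-- counts of surviving elements are unchanged by stripping all copies of the head
theorem count_filter_ne (w x : String) (hx : x ≠ w) (t : List String) :
    (t.filter (fun y => y != w)).count x = t.count x := by
  rw [List.count_filter]
  simp [hx]

-- the unfolded recursion equation of triplicates2Go at a cons cell
theorem go_cons (w : String) (t : List String) :
    triplicates2Go (w :: t)
      = (if (w :: t).length - (t.filter (fun x => x != w)).length == 3 then some w
         else triplicates2Go (t.filter (fun x => x != w))) := by
  rw [triplicates2Go]

-- B's recursion computes the first element of seq whose total count in seq is 3
theorem go_eq_find (seq : List String) :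
    triplicates2Go seq = seq.find? (fun w => seq.count w == 3) := by
  induction hn : seq.length using Nat.strong_induction_on generalizing seq with
  | _ n ih =>
    cases seq with
    | nil => simp [triplicates2Go]
    | cons w t =>
      rw [go_cons]
      simp only [len_sub_filter w t]
      by_cases h3 : (w :: t).count w = 3
      · have hb : ((w :: t).count w == 3) = true := by rw [h3]; rfl
        rw [hb, if_pos rfl]
        symm
        apply List.find?_cons_of_pos
        exact hb
      · have hb : ((w :: t).count w == 3) = false := by
          simp only [beq_eq_false_iff_ne, ne_eq]; exact h3
        rw [hb, if_neg (by simp)]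
        have hlt : (t.filter (fun x => x != w)).length < n := by
          have := List.length_filter_le (fun x => x != w) t
          simp only [List.length_cons] at hn
          omega
        rw [ih _ hlt _ rfl]
        -- left: find? over stripped list with its own counts; relate to find? over w :: t
        have hstep : (w :: t).find? (fun x => (w :: t).count x == 3)
            = (t.filter (fun x => x != w)).find? (fun x => (w :: t).count x == 3) := by
          rw [List.find?_cons_of_neg (by intro hh; rw [hb] at hh; cases hh)]
          exact find?_filter_ne _ w hb t
        rw [hstep]
        apply (find?_congr_mem _ _ _ _).symm
        intro x hxmem
        have hxw : x ≠ w := by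
          rcases List.mem_filter.mp hxmem with ⟨_, hne⟩
          simpa using hne
        have hc : (t.filter (fun y => y != w)).count x = (w :: t).count x := by
          rw [count_filter_ne w x hxw t]
          simp [Ne.symm hxw]
        rw [hc]

-- ===== VERDICT (by name: the statement is the Claim_ definition above) =====
theorem triplicates2_spec : Claim_equal_triplicates2 := by
  intro a b c _
  unfold Spec_triplicates2 triplicates2 triplicates2_alt
  have hfold :
      (a ++ b ++ c).foldl
        (fun d w => if !(d.contains w) then d.insert w 1 else d.insert w (d.getD w 0 + 1))
        PySem.Dict.empty
      = PySem.Dict.counter (a ++ b ++ c) := by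
    rw [show (fun (d : PySem.Dict String Int) (w : String) =>
          if !(d.contains w) then d.insert w 1 else d.insert w (d.getD w 0 + 1))
        = (fun d w => d.insert w (d.getD w 0 + 1)) from funext fun d => funext fun w => upd_eq d w]
    exact PySem.Dict.foldl_insert_getD_add_one_eq_counter (a ++ b ++ c)
  simp only [hfold, PySem.Dict.keys_counter, PySem.Dict.getD_counter]
  rw [find?_ofList, go_eq_find]
  congr 1
  funext w
  exact cast_beq3 _
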